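-- pv_equiv track=rewrite | github.com/GabiCasini/War-G5 | tests/ia_sse_client.py | parse_sse_lines
-- ===== SOURCE A (Python) =====
-- def parse_sse_lines(iterable):
--     """Yield complete data blobs parsed from SSE lines (simple parser)."""
--     buffer = []
--     for raw in iterable:
--         if not raw:
--             # keepalive or empty
--             continue
--         line = raw.decode('utf-8') if isinstance(raw, bytes) else raw
--         line = line.strip('\r')
--         if line == '':
--             if buffer:
--                 yield '\n'.join(buffer)
--                 buffer = []
--             continue
--         if line.startswith('data:'):
--             buffer.append(line[len('data:'):].strip())
--         # skip other SSE fields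
--     if buffer:
--         yield '\n'.join(buffer)
-- ===== SOURCE B (Python) =====
-- def _segments(lines):
--     """Split the line stream into segments separated by blank lines (last segment included)."""
--     seg = []
--     for line in lines:
--         if line == '':
--             yield seg
--             seg = []
--         else:
--             seg.append(line)
--     yield seg
--
--
-- def parse_sse_lines(iterable):
--     """Yield complete data blobs parsed from SSE lines (simple parser)."""
--     lines = [(raw.decode('utf-8') if isinstance(raw, bytes) else raw).strip('\r')
--              for raw in iterable if raw]
--     for seg in _segments(lines):
--         payload = [line[len('data:'):].strip() for line in seg if line.startswith('data:')]
--         if payload: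
--             yield '\n'.join(payload)
-- ===== Notes on version B (the rewrite author's own statement) =====
-- stated objective: alternative
-- what changed: Replaces A's running buffer with inline flushes by a group-then-emit pass: filter falsy raws, map to stripped lines, split the stream into blank-line-separated segments, then emit each segment's joined data payloads.
import Mathlib
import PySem

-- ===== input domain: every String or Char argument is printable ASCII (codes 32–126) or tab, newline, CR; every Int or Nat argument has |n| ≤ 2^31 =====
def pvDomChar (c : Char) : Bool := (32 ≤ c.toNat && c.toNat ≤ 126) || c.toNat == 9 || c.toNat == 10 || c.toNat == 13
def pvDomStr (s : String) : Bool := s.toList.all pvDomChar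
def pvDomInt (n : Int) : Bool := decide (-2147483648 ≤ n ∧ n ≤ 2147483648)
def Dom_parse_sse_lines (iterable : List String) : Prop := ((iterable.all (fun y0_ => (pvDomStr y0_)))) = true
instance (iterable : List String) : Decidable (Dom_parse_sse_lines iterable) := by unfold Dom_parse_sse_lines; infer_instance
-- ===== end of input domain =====

-- B replaces A's running buffer with inline flushes by a group-then-emit pass
-- (filter, map, split on blank lines, emit each segment's data payload); objective: alternative decomposition.

-- ===== PORT A =====
-- one loop step of A: state = (yielded so far, buffer)
def pvStepA (st : List String × List String) (raw : String) : List String × List String :=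
  if raw = "" then st
  else
    let line := PySem.Str.stripChars raw "\r"
    if line = "" then
      (if st.2 ≠ [] then (st.1 ++ [PySem.Str.join "\n" st.2], []) else st)
    else if PySem.Str.startswith line "data:" then
      (st.1, st.2 ++ [PySem.Str.strip (PySem.Str.slice line (some 5) none)])
    else st

def parse_sse_lines (iterable : List String) : List String :=
  let st := iterable.foldl pvStepA ([], [])
  if st.2 ≠ [] then st.1 ++ [PySem.Str.join "\n" st.2] else st.1

-- ===== PORT B =====
-- B's _segments generator: split into segments separated by blank lines
def pvSegments : List String → List String → List (List String)
  | seg, [] => [seg]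
  | seg, l :: ls => if l = "" then seg :: pvSegments [] ls else pvSegments (seg ++ [l]) ls

-- payload list of one segment
def pvPayload (seg : List String) : List String :=
  (seg.filter (fun l => PySem.Str.startswith l "data:")).map
    (fun l => PySem.Str.strip (PySem.Str.slice l (some 5) none))

def parse_sse_lines_alt (iterable : List String) : List String :=
  let lines := (iterable.filter (fun r => r ≠ "")).map (fun r => PySem.Str.stripChars r "\r")
  (pvSegments [] lines).flatMap (fun seg =>
    let payload := pvPayload seg
    if payload ≠ [] then [PySem.Str.join "\n" payload] else [])

-- ===== PRECONDITION & SPEC =====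
def Spec_parse_sse_lines (iterable : List String) (out : List String) : Prop := out = parse_sse_lines_alt iterable
instance (iterable : List String) (out : List String) : Decidable (Spec_parse_sse_lines iterable out) := by unfold Spec_parse_sse_lines; infer_instance

-- ===== CLAIM (what is proved, stated in full; the proofs are below) =====
def Claim_equal_parse_sse_lines : Prop := ∀ (iterable : List String), Dom_parse_sse_lines iterable → Spec_parse_sse_lines iterable (parse_sse_lines iterable)

-- ===== LEMMAS AND PROOFS =====

-- reference recursion over the processed line stream, carrying the current payload buffer
def pvRef (buf : List String) : List String → List String
  | [] => if buf ≠ [] then [PySem.Str.join "\n" buf] else []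
  | l :: ls =>
    if l = "" then
      (if buf ≠ [] then PySem.Str.join "\n" buf :: pvRef [] ls else pvRef [] ls)
    else if PySem.Str.startswith l "data:" then
      pvRef (buf ++ [PySem.Str.strip (PySem.Str.slice l (some 5) none)]) ls
    else pvRef buf ls

lemma pvA_eq_ref (iterable : List String) : ∀ (out buf : List String),
    (let st := iterable.foldl pvStepA (out, buf)
     if st.2 ≠ [] then st.1 ++ [PySem.Str.join "\n" st.2] else st.1)
    = out ++ pvRef buf ((iterable.filter (fun r => r ≠ "")).map (fun r => PySem.Str.stripChars r "\r")) := by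
  induction iterable with
  | nil =>
    intro out buf
    simp only [List.foldl_nil, List.filter_nil, List.map_nil, pvRef]
    split <;> simp
  | cons raw rest ih =>
    intro out buf
    by_cases hraw : raw = ""
    · simp [hraw, pvStepA, ih]
    · simp only [List.foldl_cons, List.filter_cons, hraw, decide_true, ne_eq,
        not_false_eq_true, if_true, List.map_cons]
      by_cases hline : PySem.Str.stripChars raw "\r" = ""
      · by_cases hbuf : buf = []
        · simp [pvStepA, hraw, hline, hbuf, ih, pvRef]
        · simp [pvStepA, hraw, hline, hbuf, ih, pvRef, List.append_assoc]
      · simp [pvStepA, hraw, hline, ih, pvRef]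
        split <;> simp

lemma pvPayload_append_singleton (seg : List String) (l : String) :
    pvPayload (seg ++ [l]) =
      pvPayload seg ++ (if PySem.Str.startswith l "data:" then
        [PySem.Str.strip (PySem.Str.slice l (some 5) none)] else []) := by
  simp only [pvPayload, List.filter_append, List.map_append]
  split <;> simp_all

lemma pvB_eq_ref (lines : List String) : ∀ (seg : List String),
    (pvSegments seg lines).flatMap (fun seg =>
      let payload := pvPayload seg
      if payload ≠ [] then [PySem.Str.join "\n" payload] else [])
    = pvRef (pvPayload seg) lines := by
  induction lines with
  | nil =>
    intro seg
    simp only [pvSegments, List.flatMap_cons, List.flatMap_nil, pvRef]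
    split <;> simp_all
  | cons l ls ih =>
    intro seg
    by_cases hl : l = ""
    · simp only [pvSegments, hl, if_true, List.flatMap_cons, pvRef, ne_eq]
      have h0 : pvPayload ([] : List String) = [] := by simp [pvPayload]
      rw [ih []]
      by_cases hbuf : pvPayload seg = [] <;> simp [hbuf, h0]
    · simp only [pvSegments, hl, if_false, pvRef]
      rw [ih (seg ++ [l]), pvPayload_append_singleton]
      split <;> simp

-- ===== VERDICT (by name: the statement is the Claim_ definition above) =====
theorem parse_sse_lines_spec : Claim_equal_parse_sse_lines := by
  intro iterable _
  unfold Spec_parse_sse_lines parse_sse_lines parse_sse_lines_alt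
  rw [pvA_eq_ref iterable [] []]
  rw [pvB_eq_ref _ []]
  simp [pvPayload]
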